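-- pv_equiv track=rewrite | github.com/qingruili/Question-Type-Aware-VQA-Analysis | hw2/answer/analyze_errors.py | count_chunks
-- ===== SOURCE A (Python) =====
-- from collections import defaultdict
--
-- def split_tag(chunk_tag):
--     """Split chunk tag into IOBES prefix and chunk_type"""
--     if chunk_tag == 'O':
--         return ('O', None)
--     return chunk_tag.split('-', maxsplit=1)
--
-- def is_chunk_end(prev_tag, tag):
--     """Check if the previous chunk ended between the previous and current word"""
--     prefix1, chunk_type1 = split_tag(prev_tag)
--     prefix2, chunk_type2 = split_tag(tag)
--
--     if prefix1 == 'O':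
--         return False
--     if prefix2 == 'O':
--         return prefix1 != 'O'
--     if chunk_type1 != chunk_type2:
--         return True
--     return prefix2 in ['B', 'S'] or prefix1 in ['E', 'S']
--
-- def is_chunk_start(prev_tag, tag):
--     """Check if a new chunk started between the previous and current word"""
--     prefix1, chunk_type1 = split_tag(prev_tag)
--     prefix2, chunk_type2 = split_tag(tag)
--
--     if prefix2 == 'O':
--         return False
--     if prefix1 == 'O':
--         return prefix2 != 'O'
--     if chunk_type1 != chunk_type2:
--         return True
--     return prefix2 in ['B', 'S'] or prefix1 in ['E', 'S']
--
-- def count_chunks(true_seqs, pred_seqs):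
--     """Count correct, true, and predicted chunks"""
--     correct_chunks = defaultdict(int)
--     true_chunks = defaultdict(int)
--     pred_chunks = defaultdict(int)
--
--     correct_counts = defaultdict(int)
--     true_counts = defaultdict(int)
--     pred_counts = defaultdict(int)
--
--     prev_true_tag, prev_pred_tag = 'O', 'O'
--     correct_chunk = None
--
--     for true_tag, pred_tag in zip(true_seqs, pred_seqs):
--         if true_tag == pred_tag:
--             correct_counts[true_tag] += 1
--         true_counts[true_tag] += 1
--         pred_counts[pred_tag] += 1
--
--         _, true_type = split_tag(true_tag)
--         _, pred_type = split_tag(pred_tag)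
--
--         if correct_chunk is not None:
--             true_end = is_chunk_end(prev_true_tag, true_tag)
--             pred_end = is_chunk_end(prev_pred_tag, pred_tag)
--
--             if pred_end and true_end:
--                 correct_chunks[correct_chunk] += 1
--                 correct_chunk = None
--             elif pred_end != true_end or true_type != pred_type:
--                 correct_chunk = None
--
--         true_start = is_chunk_start(prev_true_tag, true_tag)
--         pred_start = is_chunk_start(prev_pred_tag, pred_tag)
--
--         if true_start and pred_start and true_type == pred_type:
--             correct_chunk = true_type
--         if true_start:
--             true_chunks[true_type] += 1
--         if pred_start:
--             pred_chunks[pred_type] += 1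
--
--         prev_true_tag, prev_pred_tag = true_tag, pred_tag
--
--     if correct_chunk is not None:
--         correct_chunks[correct_chunk] += 1
--
--     return (correct_chunks, true_chunks, pred_chunks,
--             correct_counts, true_counts, pred_counts)
-- ===== SOURCE B (Python) =====
-- from collections import defaultdict
--
-- def split_tag(chunk_tag):
--     if chunk_tag == 'O':
--         return ('O', None)
--     return chunk_tag.split('-', maxsplit=1)
--
-- def is_chunk_end(prev_tag, tag):
--     prefix1, chunk_type1 = split_tag(prev_tag)
--     prefix2, chunk_type2 = split_tag(tag)
--     if prefix1 == 'O':
--         return False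
--     if prefix2 == 'O':
--         return prefix1 != 'O'
--     if chunk_type1 != chunk_type2:
--         return True
--     return prefix2 in ['B', 'S'] or prefix1 in ['E', 'S']
--
-- def is_chunk_start(prev_tag, tag):
--     prefix1, chunk_type1 = split_tag(prev_tag)
--     prefix2, chunk_type2 = split_tag(tag)
--     if prefix2 == 'O':
--         return False
--     if prefix1 == 'O':
--         return prefix2 != 'O'
--     if chunk_type1 != chunk_type2:
--         return True
--     return prefix2 in ['B', 'S'] or prefix1 in ['E', 'S']
--
-- def _spans(tags):
--     """Chunk spans (type, start, end-exclusive) of a tag sequence."""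
--     spans = []
--     prev = 'O'
--     open_span = None
--     for i, tag in enumerate(tags):
--         if open_span is not None and is_chunk_end(prev, tag):
--             spans.append((open_span[0], open_span[1], i))
--             open_span = None
--         if is_chunk_start(prev, tag):
--             open_span = (split_tag(tag)[1], i)
--         prev = tag
--     if open_span is not None:
--         spans.append((open_span[0], open_span[1], len(tags)))
--     return spans
--
-- def _tally(items):
--     d = defaultdict(int)
--     for x in items:
--         d[x] += 1
--     return d
--
-- def count_chunks(true_seqs, pred_seqs):
--     """Count correct, true, and predicted chunks (span-extraction formulation)."""
--     t_tags = list(true_seqs)[:min(len(true_seqs), len(pred_seqs))]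
--     p_tags = list(pred_seqs)[:len(t_tags)]
--     t_spans = _spans(t_tags)
--     p_spans = _spans(p_tags)
--     p_set = set(p_spans)
--     correct_chunks = _tally(ty for (ty, s, e) in t_spans if (ty, s, e) in p_set)
--     true_chunks = _tally(ty for (ty, _, _) in t_spans)
--     pred_chunks = _tally(ty for (ty, _, _) in p_spans)
--     correct_counts = _tally(t for t, p in zip(t_tags, p_tags) if t == p)
--     true_counts = _tally(t_tags)
--     pred_counts = _tally(p_tags)
--     return (correct_chunks, true_chunks, pred_chunks,
--             correct_counts, true_counts, pred_counts)
-- ===== Notes on version B (the rewrite author's own statement) =====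
-- stated objective: alternative
-- what changed: A tracks correct chunks on the fly with a single interleaved state machine over zip(true,pred); B instead extracts explicit chunk span lists (type,start,end) from each sequence separately, gets correct_chunks by intersecting the two span sets, and computes the per-tag counts in an independent elementwise pass.
import Mathlib
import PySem

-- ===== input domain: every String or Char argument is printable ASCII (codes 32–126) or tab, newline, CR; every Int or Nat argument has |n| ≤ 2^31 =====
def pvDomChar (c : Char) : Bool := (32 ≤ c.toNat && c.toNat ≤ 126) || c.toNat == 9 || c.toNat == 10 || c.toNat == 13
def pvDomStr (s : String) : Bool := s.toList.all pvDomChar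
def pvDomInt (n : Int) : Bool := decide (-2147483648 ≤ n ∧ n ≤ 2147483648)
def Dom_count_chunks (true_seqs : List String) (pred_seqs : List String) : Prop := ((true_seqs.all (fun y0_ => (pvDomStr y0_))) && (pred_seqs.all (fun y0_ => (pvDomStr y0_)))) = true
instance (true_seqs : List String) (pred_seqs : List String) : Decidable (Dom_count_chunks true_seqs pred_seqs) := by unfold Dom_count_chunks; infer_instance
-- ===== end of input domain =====

-- B replaces A's interleaved correct-chunk state machine by explicit span extraction and
-- span-set intersection (objective: alternative formulation of the same O(n) computation).


-- ===== PORT A =====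
-- shared helpers: Source A and Source B contain these same three module-level functions.
-- split_tag: on a tag that is neither 'O' nor contains '-', Python's later unpacking raises
-- ValueError (excluded by Pre_); there the port returns the arbitrary stand-in (t, none).
def splitTag (t : String) : String × Option String :=
  if t = "O" then ("O", none)
  else
    match PySem.Str.splitMax? t "-" 1 with
    | some [p, ty] => (p, some ty)
    | _ => (t, none)

def isChunkEnd (prevTag tag : String) : Bool :=
  if (splitTag prevTag).1 = "O" then false
  else if (splitTag tag).1 = "O" then decide ((splitTag prevTag).1 ≠ "O")
  else if (splitTag prevTag).2 ≠ (splitTag tag).2 then true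
  else ((splitTag tag).1 = "B" || (splitTag tag).1 = "S"
        || (splitTag prevTag).1 = "E" || (splitTag prevTag).1 = "S")

def isChunkStart (prevTag tag : String) : Bool :=
  if (splitTag tag).1 = "O" then false
  else if (splitTag prevTag).1 = "O" then decide ((splitTag tag).1 ≠ "O")
  else if (splitTag prevTag).2 ≠ (splitTag tag).2 then true
  else ((splitTag tag).1 = "B" || (splitTag tag).1 = "S"
        || (splitTag prevTag).1 = "E" || (splitTag prevTag).1 = "S")

-- defaultdict(int) increment d[k] += 1
def bump (d : PySem.Dict String Int) (k : String) : PySem.Dict String Int := d.modify k 0 (· + 1)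

-- A's single loop over zip(true_seqs, pred_seqs); correct_chunk is `corr` (None = no tracked chunk;
-- a tracked chunk's type is a string, so Option String is exact).  Keys true_chunks[true_type] /
-- pred_chunks[pred_type] are always strings under Pre_; `.getD ""` is an unreachable stand-in.
def countLoopA : List (String × String) → String → String → Option String →
    PySem.Dict String Int → PySem.Dict String Int → PySem.Dict String Int →
    PySem.Dict String Int → PySem.Dict String Int → PySem.Dict String Int →
    PySem.Dict String Int × PySem.Dict String Int × PySem.Dict String Int ×
    PySem.Dict String Int × PySem.Dict String Int × PySem.Dict String Int
  | [], _, _, corr, cc, tc, pc, c1, t1, p1 =>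
      ((match corr with | some c => bump cc c | none => cc), tc, pc, c1, t1, p1)
  | (tt, pt) :: rest, prevT, prevP, corr, cc, tc, pc, c1, t1, p1 =>
      let c1' := if tt == pt then bump c1 tt else c1
      let t1' := bump t1 tt
      let p1' := bump p1 pt
      let tty := (splitTag tt).2
      let pty := (splitTag pt).2
      let r : PySem.Dict String Int × Option String :=
        match corr with
        | some c =>
            let te := isChunkEnd prevT tt
            let pe := isChunkEnd prevP pt
            if pe && te then (bump cc c, none)
            else if pe != te || tty != pty then (cc, none)
            else (cc, some c)
        | none => (cc, none)
      let ts := isChunkStart prevT tt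
      let ps := isChunkStart prevP pt
      let corr₂ := if ts && ps && tty == pty then tty else r.2
      let tc' := if ts then bump tc (tty.getD "") else tc
      let pc' := if ps then bump pc (pty.getD "") else pc
      countLoopA rest tt pt corr₂ r.1 tc' pc' c1' t1' p1'

def count_chunks (true_seqs : List String) (pred_seqs : List String) : (List (String × Int)) × (List (String × Int)) × (List (String × Int)) × (List (String × Int)) × (List (String × Int)) × (List (String × Int)) :=
  let r := countLoopA (true_seqs.zip pred_seqs) "O" "O" none
    PySem.Dict.empty PySem.Dict.empty PySem.Dict.empty PySem.Dict.empty PySem.Dict.empty PySem.Dict.empty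
  (r.1.items, r.2.1.items, r.2.2.1.items, r.2.2.2.1.items, r.2.2.2.2.1.items, r.2.2.2.2.2.items)

-- ===== PORT B =====
-- a chunk span: (chunk type as split_tag yields it, start index, end index exclusive)
-- Source B's _spans loop (open_span tracking; close on is_chunk_end or at sequence end)
def spansGo : List String → String → Option (Option String × Nat) →
    List (Option String × Nat × Nat) → Nat → List (Option String × Nat × Nat)
  | [], _, o, acc, i =>
      match o with
      | some (ty, s) => acc ++ [(ty, s, i)]
      | none => acc
  | tag :: rest, prev, o, acc, i =>
      let r : List (Option String × Nat × Nat) × Option (Option String × Nat) :=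
        match o with
        | some (ty, s) => if isChunkEnd prev tag then (acc ++ [(ty, s, i)], none) else (acc, o)
        | none => (acc, none)
      let o₂ := if isChunkStart prev tag then some ((splitTag tag).2, i) else r.2
      spansGo rest tag o₂ r.1 (i + 1)

def spansB (tags : List String) : List (Option String × Nat × Nat) := spansGo tags "O" none [] 0

-- Source B's _tally loop; span-type keys are strings under Pre_ (`.getD ""` unreachable stand-in)
def tallyB (ks : List String) : PySem.Dict String Int :=
  ks.foldl (fun d k => d.modify k 0 (· + 1)) PySem.Dict.empty

def count_chunks_alt (true_seqs : List String) (pred_seqs : List String) : (List (String × Int)) × (List (String × Int)) × (List (String × Int)) × (List (String × Int)) × (List (String × Int)) × (List (String × Int)) :=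
  let n := min true_seqs.length pred_seqs.length
  let tt := true_seqs.take n
  let pp := pred_seqs.take n
  let tsp := spansB tt
  let psp := spansB pp
  let pset := PySem.Set.ofList psp
  let correct := tallyB ((tsp.filter (fun sp => pset.contains sp)).map (fun sp => sp.1.getD ""))
  let truec := tallyB (tsp.map (fun sp => sp.1.getD ""))
  let predc := tallyB (psp.map (fun sp => sp.1.getD ""))
  let ccnt := tallyB (((tt.zip pp).filter (fun pr => pr.1 == pr.2)).map (fun pr => pr.1))
  let tcnt := tallyB tt
  let pcnt := tallyB pp
  (correct.items, truec.items, predc.items, ccnt.items, tcnt.items, pcnt.items)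

-- ===== PRECONDITION & SPEC =====
-- A zipped tag that is neither 'O' nor contains '-' makes split_tag's 2-tuple unpacking raise
-- ValueError in A (and in B); Pre_ admits exactly the inputs where every zipped tag is well formed.
def okTagB (t : String) : Bool := t == "O" || t.toList.contains '-'

def Pre_count_chunks (true_seqs : List String) (pred_seqs : List String) : Prop :=
  ((true_seqs.take (min true_seqs.length pred_seqs.length)).all okTagB
    && (pred_seqs.take (min true_seqs.length pred_seqs.length)).all okTagB) = true
instance (true_seqs : List String) (pred_seqs : List String) : Decidable (Pre_count_chunks true_seqs pred_seqs) := by unfold Pre_count_chunks; infer_instance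

def pvWitness_count_chunks : List String × List String :=
  (["B-X", "I-X", "O", "S-Y"], ["B-X", "E-X", "O", "S-Y"])

def Spec_count_chunks (true_seqs : List String) (pred_seqs : List String) (out : (List (String × Int)) × (List (String × Int)) × (List (String × Int)) × (List (String × Int)) × (List (String × Int)) × (List (String × Int))) : Prop := out = count_chunks_alt true_seqs pred_seqs
instance (true_seqs : List String) (pred_seqs : List String) (out : (List (String × Int)) × (List (String × Int)) × (List (String × Int)) × (List (String × Int)) × (List (String × Int)) × (List (String × Int))) : Decidable (Spec_count_chunks true_seqs pred_seqs out) := by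
  unfold Spec_count_chunks
  letI h2 : DecidableEq ((List (String × Int)) × (List (String × Int))) := instDecidableEqProd
  letI h3 : DecidableEq ((List (String × Int)) × (List (String × Int)) × (List (String × Int))) := instDecidableEqProd
  letI h4 : DecidableEq ((List (String × Int)) × (List (String × Int)) × (List (String × Int)) × (List (String × Int))) := instDecidableEqProd
  letI h5 : DecidableEq ((List (String × Int)) × (List (String × Int)) × (List (String × Int)) × (List (String × Int)) × (List (String × Int))) := instDecidableEqProd
  letI h6 : DecidableEq ((List (String × Int)) × (List (String × Int)) × (List (String × Int)) × (List (String × Int)) × (List (String × Int)) × (List (String × Int))) := instDecidableEqProd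
  exact h6 _ _

-- ===== CLAIM (what is proved, stated in full; the proofs are below) =====
def Claim_equal_count_chunks : Prop := ∀ (true_seqs : List String) (pred_seqs : List String), Dom_count_chunks true_seqs pred_seqs → Pre_count_chunks true_seqs pred_seqs → Spec_count_chunks true_seqs pred_seqs (count_chunks true_seqs pred_seqs)


-- ===== LEMMAS AND PROOFS =====

-- abbreviations used by the proofs only
def keyOf (sp : Option String × Nat × Nat) : String := sp.1.getD ""

def openKeys : Option (Option String × Nat) → List String
  | some (ty, _) => [ty.getD ""]
  | none => []

-- the correct_chunk A tracks, expressed from the two scanners' open chunks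
def matchOpen : Option (Option String × Nat) → Option (Option String × Nat) → Option String
  | some (a, s), some (b, u) => if a = b ∧ s = u then a else none
  | _, _ => none

-- scanner invariant: an open chunk started before i, the previous tag is inside it
def invSeq (prev : String) (o : Option (Option String × Nat)) (i : Nat) : Prop :=
  ∀ ty s, o = some (ty, s) → s < i ∧ (splitTag prev).1 ≠ "O" ∧ (splitTag prev).2 = ty ∧ ty.isSome

-- close the open chunk (if any) when c holds, recording end index i
def closeIf (c : Bool) (o : Option (Option String × Nat))
    (acc : List (Option String × Nat × Nat)) (i : Nat) : List (Option String × Nat × Nat) :=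
  match o with
  | some (ty, s) => if c then acc ++ [(ty, s, i)] else acc
  | none => acc

lemma spansGo_nil (prev : String) (o : Option (Option String × Nat)) (acc : List (Option String × Nat × Nat)) (i : Nat) :
    spansGo [] prev o acc i = closeIf true o acc i := by
  cases o with
  | none => rfl
  | some p => obtain ⟨ty, s⟩ := p; rfl

lemma spansGo_cons (tag : String) (rest : List String) (prev : String) (o : Option (Option String × Nat))
    (acc : List (Option String × Nat × Nat)) (i : Nat) :
    spansGo (tag :: rest) prev o acc i =
      spansGo rest tag
        (if isChunkStart prev tag then some ((splitTag tag).2, i)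
         else if isChunkEnd prev tag then none else o)
        (closeIf (isChunkEnd prev tag) o acc i) (i + 1) := by
  cases o with
  | none => simp [spansGo, closeIf]
  | some p =>
      obtain ⟨ty, s⟩ := p
      by_cases h : isChunkEnd prev tag <;> simp [spansGo, closeIf, h]

-- ---- facts about the IOBES predicates ----
lemma start_prefix {prev tag : String} (h : isChunkStart prev tag = true) : (splitTag tag).1 ≠ "O" := by
  unfold isChunkStart at h
  intro hO
  simp [hO] at h

lemma start_imp_end {prev tag : String} (h1 : (splitTag prev).1 ≠ "O")
    (h : isChunkStart prev tag = true) : isChunkEnd prev tag = true := by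
  unfold isChunkStart at h
  unfold isChunkEnd
  split_ifs at h ⊢ <;> simp_all

lemma cont_of_not_end {prev tag : String} (h1 : (splitTag prev).1 ≠ "O")
    (h : isChunkEnd prev tag = false) :
    (splitTag tag).2 = (splitTag prev).2 ∧ (splitTag tag).1 ≠ "O" := by
  unfold isChunkEnd at h
  split_ifs at h <;> simp_all

lemma not_start_of_not_end {prev tag : String} (h1 : (splitTag prev).1 ≠ "O")
    (h : isChunkEnd prev tag = false) : isChunkStart prev tag = false := by
  by_contra hc
  rw [start_imp_end h1 (by simpa using hc)] at h
  simp at h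

lemma go_zero (fuel : Nat) (l cur : List Char) (acc : List (List Char)) :
    PySem.Chars.splitOnMax.go ['-'] fuel 0 l cur acc = ((cur.reverse ++ l) :: acc).reverse := by
  cases fuel with
  | zero => rw [PySem.Chars.splitOnMax.go]
  | succ n =>
      cases l with
      | nil => rw [PySem.Chars.splitOnMax.go] <;> simp
      | cons c rest => rw [PySem.Chars.splitOnMax.go]; simp

lemma go_one (fuel : Nat) : ∀ (l cur : List Char), '-' ∈ l → l.length < fuel →
    ∃ a b : List Char, PySem.Chars.splitOnMax.go ['-'] fuel 1 l cur [] = [a, b] := by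
  induction fuel with
  | zero => intro l cur h hf; omega
  | succ n ih =>
      intro l cur h hf
      cases l with
      | nil => simp at h
      | cons c rest =>
          rw [PySem.Chars.splitOnMax.go]
          by_cases hc : c = '-'
          · subst hc
            have hpre : List.isPrefixOf ['-'] ('-' :: rest) = true := by simp [List.isPrefixOf]
            simp only [hpre, if_true]
            rw [if_neg (by omega)]
            refine ⟨cur.reverse, rest, ?_⟩
            rw [go_zero]
            simp
          · have hpre : List.isPrefixOf ['-'] (c :: rest) = false := by
              simp [List.isPrefixOf]; exact fun hh => hc hh.symm
            rw [if_neg (by omega)]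
            simp only [hpre, Bool.false_eq_true, if_false]
            have hm : '-' ∈ rest := by
              rcases List.mem_cons.mp h with h1 | h1
              · exact absurd h1.symm hc
              · exact h1
            exact ih rest (c :: cur) hm (by simpa using Nat.lt_of_succ_lt_succ hf)

lemma dash_split (t : String) (h : '-' ∈ t.toList) :
    ∃ a b : List Char, PySem.Chars.splitOnMax t.toList ['-'] 1 = [a, b] := by
  unfold PySem.Chars.splitOnMax
  rw [if_neg (by omega)]
  exact go_one (t.toList.length + 1) t.toList [] h (Nat.lt_succ_self _)

lemma splitTag_isSome {t : String} (h : '-' ∈ t.toList) : ((splitTag t).2).isSome := by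
  have hO : t ≠ "O" := by
    intro he
    subst he
    revert h
    decide
  obtain ⟨a, b, hab⟩ := dash_split t h
  unfold splitTag
  rw [if_neg hO]
  have hsm : PySem.Str.splitMax? t "-" 1 = some [String.ofList a, String.ofList b] := by
    unfold PySem.Str.splitMax? PySem.Chars.splitMax?
    have hsep : ("-" : String).toList = ['-'] := by decide
    rw [hsep, if_neg (by simp), hab]
    rfl
  rw [hsm]
  rfl

lemma start_type_isSome {prev tag : String} (hok : okTagB tag = true)
    (h : isChunkStart prev tag = true) : ((splitTag tag).2).isSome := by
  have hO := start_prefix h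
  have htag : tag ≠ "O" := by
    intro he; subst he; exact hO (by rfl)
  have : '-' ∈ tag.toList := by
    unfold okTagB at hok
    simp only [Bool.or_eq_true, beq_iff_eq, List.contains_iff_mem] at hok
    rcases hok with h1 | h1
    · exact absurd h1 htag
    · simpa using h1
  exact splitTag_isSome this

-- ---- tally facts ----
lemma tallyB_append (ks : List String) (k : String) : tallyB (ks ++ [k]) = bump (tallyB ks) k := by
  simp [tallyB, List.foldl_append, bump]

-- ---- per-sequence step lemmas ----
lemma invSeq_step {prev tag : String} {o : Option (Option String × Nat)} {i : Nat}
    (hok : okTagB tag = true) (hinv : invSeq prev o i) :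
    invSeq tag
      (if isChunkStart prev tag then some ((splitTag tag).2, i)
       else if isChunkEnd prev tag then none else o) (i + 1) := by
  intro ty s heq
  by_cases hs : isChunkStart prev tag = true
  · rw [if_pos hs] at heq
    obtain ⟨h1, h2⟩ := Prod.mk.injEq .. ▸ Option.some.inj heq
    subst h2
    exact ⟨Nat.lt_succ_self i, start_prefix hs, h1, h1 ▸ start_type_isSome hok hs⟩
  · rw [if_neg hs] at heq
    by_cases he : isChunkEnd prev tag = true
    · rw [if_pos he] at heq; exact absurd heq (by simp)
    · rw [if_neg he] at heq
      obtain ⟨hlt, hpre, htyp, hsome⟩ := hinv ty s heq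
      obtain ⟨hty2, hpre2⟩ := cont_of_not_end hpre (Bool.eq_false_iff.mpr he)
      exact ⟨Nat.lt_succ_of_lt hlt, hpre2, hty2.trans htyp, hsome⟩

lemma bounds_closeIf {acc : List (Option String × Nat × Nat)} {i : Nat}
    (hb : ∀ sp ∈ acc, sp.2.2 < i) (c : Bool) (o : Option (Option String × Nat)) :
    ∀ sp ∈ closeIf c o acc i, sp.2.2 < i + 1 := by
  intro sp hsp
  cases o with
  | none => exact Nat.lt_succ_of_lt (hb sp hsp)
  | some p =>
      obtain ⟨ty, s⟩ := p
      unfold closeIf at hsp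
      by_cases h : c = true
      · simp [h] at hsp
        rcases hsp with h1 | h1
        · exact Nat.lt_succ_of_lt (hb sp h1)
        · subst h1; simp
      · simp [Bool.eq_false_iff.mpr h] at hsp
        exact Nat.lt_succ_of_lt (hb sp hsp)

lemma tally_step {prev tag : String} {o : Option (Option String × Nat)}
    {acc : List (Option String × Nat × Nat)} {i : Nat} (hinv : invSeq prev o i) :
    tallyB ((closeIf (isChunkEnd prev tag) o acc i).map keyOf ++
        openKeys (if isChunkStart prev tag then some ((splitTag tag).2, i)
                  else if isChunkEnd prev tag then none else o))
      = if isChunkStart prev tag then bump (tallyB (acc.map keyOf ++ openKeys o)) (((splitTag tag).2).getD "")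
        else tallyB (acc.map keyOf ++ openKeys o) := by
  cases o with
  | none =>
      by_cases hs : isChunkStart prev tag = true <;>
        simp [closeIf, openKeys, hs, tallyB_append]
  | some p =>
      obtain ⟨ty, s⟩ := p
      obtain ⟨_, hpre, _, _⟩ := hinv ty s rfl
      by_cases he : isChunkEnd prev tag = true
      · by_cases hs : isChunkStart prev tag = true
        · simp only [closeIf, he, if_pos, openKeys, hs, List.map_append]
          rw [tallyB_append]
          simp [keyOf]
        · simp only [closeIf, he, if_true, openKeys, hs, if_false, Bool.false_eq_true, List.map_append]
          simp [keyOf]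
      · have hs := not_start_of_not_end hpre (Bool.eq_false_iff.mpr he)
        simp [closeIf, he, hs, openKeys]

-- ---- matched-span step ----
lemma closeIf_none (c : Bool) (acc : List (Option String × Nat × Nat)) (i : Nat) :
    closeIf c none acc i = acc := rfl

lemma closeIf_some (c : Bool) (ty : Option String) (s : Nat) (acc : List (Option String × Nat × Nat)) (i : Nat) :
    closeIf c (some (ty, s)) acc i = if c then acc ++ [(ty, s, i)] else acc := rfl

lemma matched_closeIf {accT accP : List (Option String × Nat × Nat)} {i : Nat}
    (HT : ∀ sp ∈ accT, sp.2.2 < i) (HP : ∀ sp ∈ accP, sp.2.2 < i)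
    (cT cP : Bool) (oT oP : Option (Option String × Nat)) :
    (closeIf cT oT accT i).filter (fun sp => decide (sp ∈ closeIf cP oP accP i))
      = accT.filter (fun sp => decide (sp ∈ accP)) ++
        (match oT, oP with
         | some (a, s), some (b, u) => if cT ∧ cP ∧ a = b ∧ s = u then [(a, s, i)] else []
         | _, _ => []) := by
  have hnotP : ∀ (x : Option String) (y : Nat), (x, y, i) ∉ accP := fun x y h =>
    absurd (HP _ h) (by simp)
  have hold : ∀ sp ∈ accT, decide (sp ∈ closeIf cP oP accP i) = decide (sp ∈ accP) := by
    intro sp hsp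
    rw [decide_eq_decide]
    cases oP with
    | none => rw [closeIf_none]
    | some q =>
        obtain ⟨b, u⟩ := q
        rw [closeIf_some]
        by_cases hc : cP = true
        · rw [if_pos hc]
          simp only [List.mem_append, List.mem_singleton]
          constructor
          · rintro (h | h)
            · exact h
            · subst h; exact absurd (HT _ hsp) (by simp)
          · exact Or.inl
        · rw [if_neg hc]
  cases oT with
  | none =>
      rw [closeIf_none, List.filter_congr hold]
      cases oP with
      | none => simp
      | some q => obtain ⟨b, u⟩ := q; simp
  | some p =>
      obtain ⟨a, s⟩ := p
      rw [closeIf_some]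
      by_cases hcT : cT = true
      · rw [if_pos hcT, List.filter_append, List.filter_congr hold]
        congr 1
        cases oP with
        | none =>
            rw [closeIf_none]
            simp [hnotP a s]
        | some q =>
            obtain ⟨b, u⟩ := q
            rw [closeIf_some]
            by_cases hcP : cP = true
            · rw [if_pos hcP]
              by_cases he : a = b ∧ s = u
              · obtain ⟨h1, h2⟩ := he
                subst h1 h2
                simp [hnotP a s, hcT, hcP]
              · have hne : (a, s, i) ≠ (b, u, i) := by
                  intro h
                  exact he ⟨congrArg Prod.fst h, congrArg (fun z => z.2.1) h⟩
                simp [hne, he, hnotP a s]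
            · rw [if_neg hcP]
              simp [hnotP a s, hcP]
      · rw [if_neg hcT, List.filter_congr hold]
        have hF : cT = false := Bool.eq_false_iff.mpr hcT
        subst hF
        cases oP with
        | none => simp
        | some q => obtain ⟨b, u⟩ := q; simp

-- ---- A's combined step, named ----
def stepPair (prevT tt prevP pt : String) (corr : Option String) (cc : PySem.Dict String Int) :
    PySem.Dict String Int × Option String :=
  match corr with
  | some c =>
      if isChunkEnd prevP pt && isChunkEnd prevT tt then (bump cc c, none)
      else if (isChunkEnd prevP pt != isChunkEnd prevT tt) || ((splitTag tt).2 != (splitTag pt).2) then (cc, none)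
      else (cc, some c)
  | none => (cc, none)

lemma countLoopA_cons (tt pt prevT prevP : String) (corr : Option String)
    (cc tc pc c1 t1 p1 : PySem.Dict String Int) (rest : List (String × String)) :
    countLoopA ((tt, pt) :: rest) prevT prevP corr cc tc pc c1 t1 p1 =
      countLoopA rest tt pt
        (if isChunkStart prevT tt && isChunkStart prevP pt && ((splitTag tt).2 == (splitTag pt).2)
         then (splitTag tt).2 else (stepPair prevT tt prevP pt corr cc).2)
        (stepPair prevT tt prevP pt corr cc).1
        (if isChunkStart prevT tt then bump tc (((splitTag tt).2).getD "") else tc)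
        (if isChunkStart prevP pt then bump pc (((splitTag pt).2).getD "") else pc)
        (if tt == pt then bump c1 tt else c1)
        (bump t1 tt) (bump p1 pt) := by
  simp only [countLoopA, stepPair]

lemma stepPair_snd_none_of_te {prevT tt prevP pt : String} {corr : Option String}
    {cc : PySem.Dict String Int} (hte : isChunkEnd prevT tt = true) :
    (stepPair prevT tt prevP pt corr cc).2 = none := by
  unfold stepPair
  cases corr with
  | none => rfl
  | some c => split_ifs with h1 h2 <;> simp_all

lemma stepPair_snd_none_of_pe {prevT tt prevP pt : String} {corr : Option String}
    {cc : PySem.Dict String Int} (hpe : isChunkEnd prevP pt = true) :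
    (stepPair prevT tt prevP pt corr cc).2 = none := by
  unfold stepPair
  cases corr with
  | none => rfl
  | some c => split_ifs with h1 h2 <;> simp_all

lemma stepPair_snd_none_of_tyne {prevT tt prevP pt : String} {corr : Option String}
    {cc : PySem.Dict String Int} (hty : (splitTag tt).2 ≠ (splitTag pt).2) :
    (stepPair prevT tt prevP pt corr cc).2 = none := by
  unfold stepPair
  cases corr with
  | none => rfl
  | some c => split_ifs with h1 h2 <;> simp_all

lemma matchOpen_none_right (o : Option (Option String × Nat)) : matchOpen o none = none := by
  cases o with
  | none => rfl
  | some p => obtain ⟨a, s⟩ := p; rfl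

lemma corr_step {prevT tt prevP pt : String} {oT oP : Option (Option String × Nat)} {i : Nat}
    (cc : PySem.Dict String Int)
    (hT : invSeq prevT oT i) (hP : invSeq prevP oP i) :
    (if isChunkStart prevT tt && isChunkStart prevP pt && ((splitTag tt).2 == (splitTag pt).2)
     then (splitTag tt).2 else (stepPair prevT tt prevP pt (matchOpen oT oP) cc).2)
    = matchOpen
        (if isChunkStart prevT tt then some ((splitTag tt).2, i)
         else if isChunkEnd prevT tt then none else oT)
        (if isChunkStart prevP pt then some ((splitTag pt).2, i)
         else if isChunkEnd prevP pt then none else oP) := by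
  by_cases hts : isChunkStart prevT tt = true <;> by_cases hps : isChunkStart prevP pt = true
  · -- both start
    rw [if_pos hts, if_pos hps]
    by_cases hty : (splitTag tt).2 = (splitTag pt).2
    · rw [if_pos (by simp [hts, hps, hty])]
      simp [matchOpen, hty]
    · rw [if_neg (by simp [hts, hps, hty])]
      rw [stepPair_snd_none_of_tyne hty]
      simp [matchOpen, hty]
  · -- true starts, pred does not
    rw [if_pos hts, if_neg hps, if_neg (by simp [hps])]
    have hLHS : (stepPair prevT tt prevP pt (matchOpen oT oP) cc).2 = none := by
      cases oT with
      | none => rfl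
      | some p =>
          obtain ⟨a, s⟩ := p
          cases oP with
          | none => rw [matchOpen_none_right]; rfl
          | some q =>
              obtain ⟨_, hpre, _, _⟩ := hT a s rfl
              exact stepPair_snd_none_of_te (start_imp_end hpre hts)
    rw [hLHS]
    by_cases hpe : isChunkEnd prevP pt = true
    · rw [if_pos hpe, matchOpen_none_right]
    · rw [if_neg hpe]
      cases oP with
      | none => rw [matchOpen_none_right]
      | some q =>
          obtain ⟨b, u⟩ := q
          obtain ⟨hu, _, _, _⟩ := hP b u rfl
          simp only [matchOpen]
          rw [if_neg (by rintro ⟨-, h⟩; omega)]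
  · -- pred starts, true does not
    rw [if_neg hts, if_pos hps, if_neg (by simp [hts])]
    have hLHS : (stepPair prevT tt prevP pt (matchOpen oT oP) cc).2 = none := by
      cases oP with
      | none => rw [matchOpen_none_right]; rfl
      | some q =>
          obtain ⟨b, u⟩ := q
          cases oT with
          | none => rfl
          | some p =>
              obtain ⟨hu, hpre, _, _⟩ := hP b u rfl
              exact stepPair_snd_none_of_pe (start_imp_end hpre hps)
    rw [hLHS]
    by_cases hte : isChunkEnd prevT tt = true
    · rw [if_pos hte]; rfl
    · rw [if_neg hte]
      cases oT with
      | none => rfl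
      | some p =>
          obtain ⟨a, s⟩ := p
          obtain ⟨hs', _, _, _⟩ := hT a s rfl
          simp only [matchOpen]
          rw [if_neg (by rintro ⟨-, h⟩; omega)]
  · -- neither starts
    rw [if_neg hts, if_neg hps, if_neg (by simp [hts])]
    cases oT with
    | none =>
        have hLHS : (stepPair prevT tt prevP pt (matchOpen none oP) cc).2 = none := by
          cases oP with
          | none => rfl
          | some q => obtain ⟨b, u⟩ := q; rfl
        rw [hLHS]
        by_cases hte : isChunkEnd prevT tt = true
        · rw [if_pos hte]; rfl
        · rw [if_neg hte]
          by_cases hpe : isChunkEnd prevP pt = true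
          · rw [if_pos hpe, matchOpen_none_right]
          · rw [if_neg hpe]
            cases oP with
            | none => rfl
            | some q => obtain ⟨b, u⟩ := q; rfl
    | some p =>
        obtain ⟨a, s⟩ := p
        cases oP with
        | none =>
            rw [matchOpen_none_right]
            by_cases hpe : isChunkEnd prevP pt = true
            · rw [if_pos hpe]
              rw [matchOpen_none_right]
              rfl
            · rw [if_neg hpe]
              by_cases hte : isChunkEnd prevT tt = true
              · rw [if_pos hte]; rfl
              · rw [if_neg hte, matchOpen_none_right]; rfl
        | some q =>
            obtain ⟨b, u⟩ := q
            obtain ⟨hsi, hpreT, htyT, _⟩ := hT a s rfl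
            obtain ⟨hui, hpreP, htyP, _⟩ := hP b u rfl
            by_cases hab : a = b ∧ s = u
            · obtain ⟨hab1, hab2⟩ := hab
              subst hab1 hab2
              have hmo : matchOpen (some (a, s)) (some (a, s)) = a := by
                simp [matchOpen]
              by_cases hte : isChunkEnd prevT tt = true
              · rw [if_pos hte, stepPair_snd_none_of_te hte]
                by_cases hpe : isChunkEnd prevP pt = true
                · rw [if_pos hpe]; rfl
                · rw [if_neg hpe]
                  simp only [matchOpen]
              · by_cases hpe : isChunkEnd prevP pt = true
                · rw [if_pos hpe, stepPair_snd_none_of_pe hpe, if_neg hte]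
                  simp only [matchOpen]
                · -- neither chunk ends: A keeps the tracked chunk
                  rw [if_neg hte, if_neg hpe, hmo]
                  have hcT := cont_of_not_end hpreT (Bool.eq_false_iff.mpr hte)
                  have hcP := cont_of_not_end hpreP (Bool.eq_false_iff.mpr hpe)
                  have hty : (splitTag tt).2 = (splitTag pt).2 := by
                    rw [hcT.1, hcP.1, htyT, htyP]
                  unfold stepPair
                  cases ha : a with
                  | none => rfl
                  | some c =>
                      simp [Bool.eq_false_iff.mpr hte, Bool.eq_false_iff.mpr hpe, hty]
            · have hmo : matchOpen (some (a, s)) (some (b, u)) = none := by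
                simp only [matchOpen]; rw [if_neg hab]
              rw [hmo]
              have hLHS : (stepPair prevT tt prevP pt none cc).2 = none := rfl
              rw [hLHS]
              by_cases hte : isChunkEnd prevT tt = true
              · rw [if_pos hte]; rfl
              · rw [if_neg hte]
                by_cases hpe : isChunkEnd prevP pt = true
                · rw [if_pos hpe, matchOpen_none_right]
                · rw [if_neg hpe, hmo]

lemma fst_pair_ite {α β : Type} (c : Prop) [Decidable c] (d : α) (x y : β) :
    (if c then (d, x) else (d, y)).1 = d := by split_ifs <;> rfl

lemma stepPair_some (prevT tt prevP pt : String) (c : String) (cc : PySem.Dict String Int) :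
    stepPair prevT tt prevP pt (some c) cc =
      if isChunkEnd prevP pt && isChunkEnd prevT tt then (bump cc c, none)
      else if (isChunkEnd prevP pt != isChunkEnd prevT tt) || ((splitTag tt).2 != (splitTag pt).2) then (cc, none)
      else (cc, some c) := rfl

lemma extra_some (cT cP : Bool) (a b : Option String) (s u i : Nat) :
    (match (some (a, s) : Option (Option String × Nat)), (some (b, u) : Option (Option String × Nat)) with
     | some (a, s), some (b, u) => if cT ∧ cP ∧ a = b ∧ s = u then [(a, s, i)] else []
     | _, _ => ([] : List (Option String × Nat × Nat)))
    = if cT ∧ cP ∧ a = b ∧ s = u then [(a, s, i)] else [] := rfl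

lemma cc_step {prevT tt prevP pt : String} {oT oP : Option (Option String × Nat)} {i : Nat}
    {accT accP : List (Option String × Nat × Nat)}
    (HT : ∀ sp ∈ accT, sp.2.2 < i) (HP : ∀ sp ∈ accP, sp.2.2 < i)
    (hT : invSeq prevT oT i) (hP : invSeq prevP oP i) :
    (stepPair prevT tt prevP pt (matchOpen oT oP)
        (tallyB ((accT.filter (fun sp => decide (sp ∈ accP))).map keyOf))).1
    = tallyB ((((closeIf (isChunkEnd prevT tt) oT accT i)).filter
        (fun sp => decide (sp ∈ closeIf (isChunkEnd prevP pt) oP accP i))).map keyOf) := by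
  rw [matched_closeIf HT HP (isChunkEnd prevT tt) (isChunkEnd prevP pt) oT oP]
  cases oT with
  | none =>
      have h1 : matchOpen none oP = none := rfl
      rw [h1]
      have h2 : (match (none : Option (Option String × Nat)), oP with
           | some (a, s), some (b, u) =>
               if isChunkEnd prevT tt = true ∧ isChunkEnd prevP pt = true ∧ a = b ∧ s = u
               then [(a, s, i)] else []
           | _, _ => ([] : List (Option String × Nat × Nat))) = [] := by
        cases oP with
        | none => rfl
        | some q => obtain ⟨b, u⟩ := q; rfl
      rw [h2, List.append_nil]
      rfl
  | some p =>
      obtain ⟨a, s⟩ := p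
      cases oP with
      | none =>
          rw [matchOpen_none_right, List.append_nil]
          rfl
      | some q =>
          obtain ⟨b, u⟩ := q
          by_cases hab : a = b ∧ s = u
          · obtain ⟨hab1, hab2⟩ := hab
            subst hab1 hab2
            obtain ⟨_, _, _, hsome⟩ := hT a s rfl
            obtain ⟨c, hc⟩ := Option.isSome_iff_exists.mp hsome
            subst hc
            have hmo : matchOpen (some (some c, s)) (some (some c, s)) = some c := by
              simp [matchOpen]
            rw [hmo, stepPair_some, extra_some]
            by_cases hte : isChunkEnd prevT tt = true <;> by_cases hpe : isChunkEnd prevP pt = true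
            · rw [if_pos (show (isChunkEnd prevP pt && isChunkEnd prevT tt) = true by simp [hte, hpe])]
              rw [if_pos ⟨hte, hpe, rfl, rfl⟩]
              simp [tallyB_append, keyOf]
            · have hb : (isChunkEnd prevP pt && isChunkEnd prevT tt) = false := by simp [hpe]
              rw [hb, if_neg (show ¬(isChunkEnd prevT tt = true ∧ isChunkEnd prevP pt = true ∧
                    (some c : Option String) = some c ∧ s = s) from fun h => hpe h.2.1),
                  List.append_nil]
              simp only [Bool.false_eq_true, if_false]
              exact fst_pair_ite _ _ _ _
            · have hb : (isChunkEnd prevP pt && isChunkEnd prevT tt) = false := by simp [hte]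
              rw [hb, if_neg (show ¬(isChunkEnd prevT tt = true ∧ isChunkEnd prevP pt = true ∧
                    (some c : Option String) = some c ∧ s = s) from fun h => hte h.1),
                  List.append_nil]
              simp only [Bool.false_eq_true, if_false]
              exact fst_pair_ite _ _ _ _
            · have hb : (isChunkEnd prevP pt && isChunkEnd prevT tt) = false := by simp [hte]
              rw [hb, if_neg (show ¬(isChunkEnd prevT tt = true ∧ isChunkEnd prevP pt = true ∧
                    (some c : Option String) = some c ∧ s = s) from fun h => hte h.1),
                  List.append_nil]
              simp only [Bool.false_eq_true, if_false]
              exact fst_pair_ite _ _ _ _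
          · have hmo : matchOpen (some (a, s)) (some (b, u)) = none := by
              simp only [matchOpen]; rw [if_neg hab]
            rw [hmo, extra_some]
            rw [if_neg (by rintro ⟨-, -, h1, h2⟩; exact hab ⟨h1, h2⟩), List.append_nil]
            rfl

-- ---- the main loop correspondence ----
lemma mainLoop (l : List (String × String)) :
    ∀ (prevT prevP : String) (oT oP : Option (Option String × Nat))
      (accT accP : List (Option String × Nat × Nat)) (i : Nat)
      (c1 t1 p1 : PySem.Dict String Int),
    (∀ pr ∈ l, okTagB pr.1 = true ∧ okTagB pr.2 = true) →
    invSeq prevT oT i → invSeq prevP oP i →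
    (∀ sp ∈ accT, sp.2.2 < i) → (∀ sp ∈ accP, sp.2.2 < i) →
    countLoopA l prevT prevP (matchOpen oT oP)
        (tallyB ((accT.filter (fun sp => decide (sp ∈ accP))).map keyOf))
        (tallyB (accT.map keyOf ++ openKeys oT))
        (tallyB (accP.map keyOf ++ openKeys oP)) c1 t1 p1 =
      ( tallyB (((spansGo (l.map Prod.fst) prevT oT accT i).filter
            (fun sp => decide (sp ∈ spansGo (l.map Prod.snd) prevP oP accP i))).map keyOf),
        tallyB ((spansGo (l.map Prod.fst) prevT oT accT i).map keyOf),
        tallyB ((spansGo (l.map Prod.snd) prevP oP accP i).map keyOf),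
        l.foldl (fun d pr => if pr.1 == pr.2 then bump d pr.1 else d) c1,
        l.foldl (fun d pr => bump d pr.1) t1,
        l.foldl (fun d pr => bump d pr.2) p1 ) := by
  induction l with
  | nil =>
      intro prevT prevP oT oP accT accP i c1 t1 p1 hok hT hP hbT hbP
      simp only [List.map_nil, spansGo_nil, List.foldl_nil, countLoopA]
      rw [matched_closeIf hbT hbP true true oT oP]
      simp only [Prod.mk.injEq]
      refine ⟨?_, ?_, ?_⟩
      · cases oT with
        | none => cases oP with
          | none => simp [matchOpen]
          | some q => obtain ⟨b, u⟩ := q; simp [matchOpen]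
        | some p =>
          obtain ⟨a, s⟩ := p
          cases oP with
          | none => simp [matchOpen]
          | some q =>
              obtain ⟨b, u⟩ := q
              by_cases h : a = b ∧ s = u
              · obtain ⟨ha, hs⟩ := h
                obtain ⟨_, _, _, hsome⟩ := hT a s rfl
                obtain ⟨c, hc⟩ := Option.isSome_iff_exists.mp hsome
                subst ha hs
                simp [matchOpen, hc, List.map_append, tallyB_append, keyOf]
              · have hm : matchOpen (some (a, s)) (some (b, u)) = none := by
                  simp only [matchOpen]; rw [if_neg h]
                simp [hm, h]
      · cases oT with
        | none => simp [closeIf, openKeys]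
        | some p => obtain ⟨a, s⟩ := p; simp [closeIf, openKeys, keyOf]
      · cases oP with
        | none => simp [closeIf, openKeys]
        | some p => obtain ⟨a, s⟩ := p; simp [closeIf, openKeys, keyOf]
  | cons hd rest ih =>
      obtain ⟨tt, pt⟩ := hd
      intro prevT prevP oT oP accT accP i c1 t1 p1 hok hT hP hbT hbP
      have hokh := hok (tt, pt) List.mem_cons_self
      have hokr : ∀ pr ∈ rest, okTagB pr.1 = true ∧ okTagB pr.2 = true :=
        fun pr hpr => hok pr (List.mem_cons_of_mem _ hpr)
      rw [countLoopA_cons, corr_step _ hT hP, cc_step hbT hbP hT hP, ← tally_step (tag := tt) hT, ← tally_step (tag := pt) hP]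
      have := ih tt pt
        (if isChunkStart prevT tt then some ((splitTag tt).2, i)
         else if isChunkEnd prevT tt then none else oT)
        (if isChunkStart prevP pt then some ((splitTag pt).2, i)
         else if isChunkEnd prevP pt then none else oP)
        (closeIf (isChunkEnd prevT tt) oT accT i)
        (closeIf (isChunkEnd prevP pt) oP accP i) (i + 1)
        (if tt == pt then bump c1 tt else c1) (bump t1 tt) (bump p1 pt)
        hokr (invSeq_step hokh.1 hT) (invSeq_step hokh.2 hP)
        (bounds_closeIf hbT _ _) (bounds_closeIf hbP _ _)
      rw [this]
      simp only [List.map_cons, spansGo_cons, List.foldl_cons]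

-- ===== VERDICT (by name: the statement is the Claim_ definition above) =====
theorem count_chunks_spec : Claim_equal_count_chunks := by
  intro t p _ hpre
  unfold Spec_count_chunks count_chunks count_chunks_alt spansB
  have hzip : (t.take (min t.length p.length)).zip (p.take (min t.length p.length)) = t.zip p :=
    List.zip_eq_zip_take_min.symm
  have hlen : (t.take (min t.length p.length)).length ≤ (p.take (min t.length p.length)).length := by
    simp [Nat.min_comm t.length p.length]
  have hfst : (t.zip p).map Prod.fst = t.take (min t.length p.length) := by
    rw [← hzip]; exact List.map_fst_zip hlen
  have hsnd : (t.zip p).map Prod.snd = p.take (min t.length p.length) := by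
    rw [← hzip]
    exact List.map_snd_zip (by simp [Nat.min_comm t.length p.length])
  unfold Pre_count_chunks at hpre
  rw [Bool.and_eq_true] at hpre
  have hok : ∀ pr ∈ t.zip p, okTagB pr.1 = true ∧ okTagB pr.2 = true := by
    intro pr hpr
    obtain ⟨a, b⟩ := pr
    rw [← hzip] at hpr
    obtain ⟨h1, h2⟩ := List.of_mem_zip hpr
    exact ⟨List.all_eq_true.mp hpre.1 _ h1, List.all_eq_true.mp hpre.2 _ h2⟩
  have inv0 : invSeq "O" none 0 := fun ty s h => by cases h
  have hmain := mainLoop (t.zip p) "O" "O" none none [] [] 0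
      PySem.Dict.empty PySem.Dict.empty PySem.Dict.empty hok inv0 inv0
      (by simp) (by simp)
  have e0 : matchOpen none none = (none : Option String) := rfl
  have e1 : tallyB ((([] : List (Option String × Nat × Nat)).filter
      (fun sp => decide (sp ∈ ([] : List (Option String × Nat × Nat))))).map keyOf) = PySem.Dict.empty := rfl
  have e2 : tallyB (([] : List (Option String × Nat × Nat)).map keyOf ++ openKeys none) = PySem.Dict.empty := rfl
  rw [e0, e1, e2, hfst, hsnd] at hmain
  have hset : ∀ (l : List (Option String × Nat × Nat)) (sp : Option String × Nat × Nat),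
      (PySem.Set.ofList l).contains sp = decide (sp ∈ l) := by
    intro l sp
    have h1 : ((PySem.Set.ofList l).contains sp = true) ↔ (sp ∈ l) := by
      rw [PySem.Set.contains, List.contains_iff_mem]
      exact PySem.Set.mem_ofList l sp
    rw [Bool.eq_iff_iff, h1]
    simp
  have tallyB_filter_fst : ∀ (l : List (String × String)),
      tallyB ((l.filter (fun pr => pr.1 == pr.2)).map (fun pr => pr.1))
        = l.foldl (fun d pr => if pr.1 == pr.2 then bump d pr.1 else d) PySem.Dict.empty := by
    intro l
    rw [tallyB, List.foldl_map, ← PySem.List.foldl_if_eq_foldl_filter]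
    rfl
  have tallyB_fst : ∀ (l : List (String × String)),
      tallyB (l.map (fun pr => pr.1)) = l.foldl (fun d pr => bump d pr.1) PySem.Dict.empty := by
    intro l
    rw [tallyB, List.foldl_map]
    rfl
  have tallyB_snd : ∀ (l : List (String × String)),
      tallyB (l.map (fun pr => pr.2)) = l.foldl (fun d pr => bump d pr.2) PySem.Dict.empty := by
    intro l
    rw [tallyB, List.foldl_map]
    rfl
  simp only [count_chunks, count_chunks_alt, spansB]
  rw [hmain]
  have hfilt : (spansGo (t.take (min t.length p.length)) "O" none [] 0).filter
        (fun sp => (PySem.Set.ofList (spansGo (p.take (min t.length p.length)) "O" none [] 0)).contains sp)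
      = (spansGo (t.take (min t.length p.length)) "O" none [] 0).filter
        (fun sp => decide (sp ∈ spansGo (p.take (min t.length p.length)) "O" none [] 0)) :=
    List.filter_congr (fun sp _ => hset _ sp)
  rw [hfilt, hzip, tallyB_filter_fst, ← hfst, ← hsnd, tallyB_fst, tallyB_snd]
  have hk : keyOf = fun sp : Option String × Nat × Nat => sp.1.getD "" := rfl
  rw [hk]
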